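-- pv_equiv track=rewrite | github.com/eliagroup/ToOp | scripts/patch_uv_lock_for_fossa.py | patch_package_block
-- ===== SOURCE A (Python) =====
-- def patch_package_block(block_lines: list[str], version: str) -> tuple[list[str], bool]:
--     """Patch one ``[[package]]`` block if it is an editable package without version."""
--     has_version = any(line.startswith("version = ") for line in block_lines)
--     is_editable = any("source = { editable = " in line for line in block_lines)
--
--     if has_version or not is_editable:
--         return block_lines, False
--
--     patched_lines: list[str] = []
--     inserted_version = False
--     for line in block_lines:
--         patched_lines.append(line)
--         if not inserted_version and line.startswith("name = "):
--             patched_lines.append(f'version = "{version}"\n')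
--             inserted_version = True
--
--     if not inserted_version:
--         patched_lines.insert(1, f'version = "{version}"\n')
--
--     return patched_lines, True
-- ===== SOURCE B (Python) =====
-- def patch_package_block(block_lines: list[str], version: str) -> tuple[list[str], bool]:
--     """Patch one ``[[package]]`` block if it is an editable package without version."""
--     has_version = any(line.startswith("version = ") for line in block_lines)
--     is_editable = any("source = { editable = " in line for line in block_lines)
--     if has_version or not is_editable:
--         return block_lines, False
--     new_line = f'version = "{version}"\n'
--     idx = next((i for i, line in enumerate(block_lines) if line.startswith("name = ")), None)
--     cut = 1 if idx is None else idx + 1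
--     return block_lines[:cut] + [new_line] + block_lines[cut:], True
-- ===== Notes on version B (the rewrite author's own statement) =====
-- stated objective: simpler
-- what changed: The line-by-line copy loop with an inserted_version flag (plus the post-loop insert(1,...) fallback) is replaced by computing the first 'name = ' line index up front and building the result by a single slice-splice.
import Mathlib
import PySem

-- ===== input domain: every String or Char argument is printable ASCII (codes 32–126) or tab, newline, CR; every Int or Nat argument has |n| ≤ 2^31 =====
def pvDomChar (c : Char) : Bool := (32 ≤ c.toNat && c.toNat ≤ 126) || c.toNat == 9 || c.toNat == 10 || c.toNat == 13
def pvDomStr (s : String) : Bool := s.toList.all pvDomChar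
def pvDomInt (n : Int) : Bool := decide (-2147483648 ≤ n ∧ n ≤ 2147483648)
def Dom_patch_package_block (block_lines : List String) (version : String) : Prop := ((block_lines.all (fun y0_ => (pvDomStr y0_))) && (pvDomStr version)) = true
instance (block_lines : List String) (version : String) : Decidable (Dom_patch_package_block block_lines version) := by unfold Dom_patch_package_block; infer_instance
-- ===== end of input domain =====

-- ===== PORT A =====
-- the body of A's for loop, state = (patched_lines, inserted_version)
def loopStep (nl : String) (acc : List String × Bool) (line : String) : List String × Bool :=
  let acc1 := acc.1 ++ [line]
  if !acc.2 && PySem.Str.startswith line "name = " then (acc1 ++ [nl], true)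
  else (acc1, acc.2)

-- B changes only the construction of the patched list: an up-front first-index + slice splice
-- instead of A's copy loop with an inserted_version flag; return value only, no mutation.
def patch_package_block (block_lines : List String) (version : String) : List String × Bool :=
  let has_version := block_lines.any (fun line => PySem.Str.startswith line "version = ")
  let is_editable := block_lines.any (fun line => PySem.Str.isIn "source = { editable = " line)
  if has_version || !is_editable then (block_lines, false)
  else
    let st := block_lines.foldl (loopStep ("version = \"" ++ version ++ "\"\n")) ([], false)
    if !st.2 then (PySem.List.insert st.1 (1 : Int) ("version = \"" ++ version ++ "\"\n"), true)
    else (st.1, true)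

-- ===== PORT B =====
def patch_package_block_alt (block_lines : List String) (version : String) : List String × Bool :=
  if block_lines.any (fun line => PySem.Str.startswith line "version = ") ||
     !(block_lines.any (fun line => PySem.Str.isIn "source = { editable = " line)) then
    (block_lines, false)
  else
    let new_line := "version = \"" ++ version ++ "\"\n"
    -- next((i for i, line in enumerate(...) if line.startswith("name = ")), None)
    let cut : Nat := match block_lines.findIdx? (fun line => PySem.Str.startswith line "name = ") with
      | none => 1
      | some i => i + 1
    -- block_lines[:cut] ++ [new_line] ++ block_lines[cut:]  (exact: cut ≥ 0)
    (block_lines.take cut ++ [new_line] ++ block_lines.drop cut, true)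

-- ===== PRECONDITION & SPEC =====
def Spec_patch_package_block (block_lines : List String) (version : String) (out : List String × Bool) : Prop := out = patch_package_block_alt block_lines version
instance (block_lines : List String) (version : String) (out : List String × Bool) : Decidable (Spec_patch_package_block block_lines version out) := by unfold Spec_patch_package_block; infer_instance

-- ===== CLAIM (what is proved, stated in full; the proofs are below) =====
def Claim_equal_patch_package_block : Prop := ∀ (block_lines : List String) (version : String), Dom_patch_package_block block_lines version → Spec_patch_package_block block_lines version (patch_package_block block_lines version)

-- ===== LEMMAS AND PROOFS =====

theorem loopStep_true (nl x : String) (p : List String) :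
    loopStep nl (p, true) x = (p ++ [x], true) := by
  simp [loopStep]

theorem loopStep_false_pos (nl x : String) (p : List String)
    (hx : PySem.Str.startswith x "name = " = true) :
    loopStep nl (p, false) x = (p ++ [x] ++ [nl], true) := by
  simp at hx
  simp [loopStep, hx]

theorem loopStep_false_neg (nl x : String) (p : List String)
    (hx : PySem.Str.startswith x "name = " = false) :
    loopStep nl (p, false) x = (p ++ [x], false) := by
  simp at hx
  simp [loopStep, hx]

-- A's loop once the flag is set: it only copies the remaining lines.
theorem loop_true (nl : String) (ls : List String) (p : List String) :
    ls.foldl (loopStep nl) (p, true) = (p ++ ls, true) := by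
  induction ls generalizing p with
  | nil => simp
  | cons x t ih => rw [List.foldl_cons, loopStep_true, ih]; simp

-- A's loop with the flag unset: splice at the first "name = " line (or plain copy if none).
theorem loop_false (nl : String) (ls : List String) (p : List String) :
    ls.foldl (loopStep nl) (p, false) =
    match ls.findIdx? (fun line => PySem.Str.startswith line "name = ") with
    | none => (p ++ ls, false)
    | some i => (p ++ ls.take (i+1) ++ [nl] ++ ls.drop (i+1), true) := by
  induction ls generalizing p with
  | nil => simp
  | cons x t ih =>
    by_cases hx : PySem.Str.startswith x "name = " = true
    · rw [List.foldl_cons, loopStep_false_pos nl x p hx, loop_true]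
      simp at hx
      simp only [List.findIdx?_cons]
      simp [hx]
    · have hx' : PySem.Str.startswith x "name = " = false := by simpa using hx
      rw [List.foldl_cons, loopStep_false_neg nl x p hx', ih]
      rw [List.findIdx?_cons, hx']
      cases h : t.findIdx? (fun line => PySem.Str.startswith line "name = ") with
      | none => simp
      | some i => simp

-- ===== VERDICT (by name: the statement is the Claim_ definition above) =====
theorem patch_package_block_spec : Claim_equal_patch_package_block := by
  intro bl v _
  unfold Spec_patch_package_block patch_package_block patch_package_block_alt
  by_cases hg : (bl.any (fun line => PySem.Str.startswith line "version = ") ||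
      !(bl.any (fun line => PySem.Str.isIn "source = { editable = " line))) = true
  · simp only [hg, if_true]
  · simp only [hg]
    rw [loop_false]
    cases h : bl.findIdx? (fun line => PySem.Str.startswith line "name = ") with
    | none =>
      cases bl with
      | nil => simp [PySem.List.insert]
      | cons a t => simp [PySem.List.insert_ofNat (a :: t) 1 _ (by simp)]
    | some i => simp
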